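-- pv_equiv track=rewrite | github.com/ivandemidov04/ak-lab-3 | translator.py | work_with_labels
-- ===== SOURCE A (Python) =====
-- def work_with_labels(instr, data):
--     res_instr, res_data = [], []
--     label_instr, label_data = {}, {}
--
--     cnt = 0
--     for i in range(1, len(instr)):
--         line = instr[i]
--         if ":" in line:
--             index = line.index(':')
--             label = line[0:index]
--             label_instr[label] = cnt
--         else:
--             res_instr.append(line)
--             cnt += 1
--
--     tmp_data = []
--     for i in range(1, len(data)):
--         line = data[i]
--         if ":" in line:
--             tmp_data.append(line)
--             continue
--
--         if line.isnumeric():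
--             tmp_data.append(line)
--         else:
--             for j in range(1, len(line)-1):
--                 letter = line[j]
--                 tmp_data.append('\'' + letter + '\'')
--             tmp_data.append('\0')
--     data = tmp_data
--
--     cnt = 0
--     for i in range(len(data)):
--         line = data[i]
--         if ":" in line:
--             index = line.index(':')
--             label = line[0:index]
--             label_data[label] = cnt
--         else:
--             res_data.append(line)
--             cnt += 1
--
--     return res_instr, res_data, label_instr, label_data
-- ===== SOURCE B (Python) =====
-- def work_with_labels(instr, data):
--     def scan(lines, expand):
--         res, labels, cnt = [], {}, 0
--         for line in lines[1:]:
--             for tok in expand(line):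
--                 if ':' in tok:
--                     labels[tok[:tok.index(':')]] = cnt
--                 else:
--                     res.append(tok)
--                     cnt += 1
--         return res, labels
--
--     def expand_data(line):
--         if ':' in line or line.isnumeric():
--             return [line]
--         return ["'" + c + "'" for c in line[1:-1]] + ['\0']
--
--     res_instr, label_instr = scan(instr, lambda line: [line])
--     res_data, label_data = scan(data, expand_data)
--     return res_instr, res_data, label_instr, label_data
-- ===== Notes on version B (the rewrite author's own statement) =====
-- stated objective: simpler
-- what changed: B drops A's intermediate tmp_data and third pass: one loop over data[1:] expands each line and classifies every emitted token on the spot via a single label-or-append helper that the instr pass shares.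
import Mathlib
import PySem

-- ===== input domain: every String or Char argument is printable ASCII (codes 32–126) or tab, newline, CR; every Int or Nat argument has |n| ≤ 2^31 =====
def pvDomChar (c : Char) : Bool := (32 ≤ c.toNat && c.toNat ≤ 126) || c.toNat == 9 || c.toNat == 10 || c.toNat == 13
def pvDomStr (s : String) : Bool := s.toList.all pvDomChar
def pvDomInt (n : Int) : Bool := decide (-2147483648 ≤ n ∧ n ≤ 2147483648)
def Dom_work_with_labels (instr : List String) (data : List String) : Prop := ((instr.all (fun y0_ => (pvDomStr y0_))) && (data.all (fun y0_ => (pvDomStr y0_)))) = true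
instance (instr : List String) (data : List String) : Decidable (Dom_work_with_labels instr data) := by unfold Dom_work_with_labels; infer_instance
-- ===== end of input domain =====

-- B fuses A's data-expansion pass and its label-offset pass into one loop over data[1:]
-- (no tmp_data), sharing one token classifier with the instr pass; objective: simpler, same cost.
-- `line.isnumeric()` is ported as PySem.Str.strIsdigit, which is exact on the ASCII domain Dom.

-- ===== PORT A =====
def work_with_labels (instr : List String) (data : List String) :
    List String × List String × (List (String × Int)) × (List (String × Int)) :=
  -- first loop: for i in range(1, len(instr))
  let s1 := (PySem.List.slice instr (some 1) none).foldl
    (fun st line =>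
      if PySem.Str.isIn ":" line then
        -- index = line.index(':'); label = line[0:index]; label_instr[label] = cnt
        (st.1, st.2.1.insert (PySem.Str.slice line (some 0) (some (PySem.Str.find line ":"))) st.2.2, st.2.2)
      else (st.1 ++ [line], st.2.1, st.2.2 + 1))
    ([], PySem.Dict.empty, 0)
  -- second loop: build tmp_data
  let tmp := (PySem.List.slice data (some 1) none).foldl
    (fun acc line =>
      if PySem.Str.isIn ":" line then acc ++ [line]
      else if PySem.Str.strIsdigit line then acc ++ [line]
      else
        -- for j in range(1, len(line)-1): tmp_data.append("'" + line[j] + "'"); then append '\0'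
        (((line.toList.drop 1).dropLast).foldl
          (fun a c => a ++ [String.ofList ['\'', c, '\'']]) acc) ++ ["\x00"])
    []
  -- third loop over tmp_data
  let s3 := tmp.foldl
    (fun st line =>
      if PySem.Str.isIn ":" line then
        -- index = line.index(':'); label = line[0:index]; label_data[label] = cnt
        (st.1, st.2.1.insert (PySem.Str.slice line (some 0) (some (PySem.Str.find line ":"))) st.2.2, st.2.2)
      else (st.1 ++ [line], st.2.1, st.2.2 + 1))
    ([], PySem.Dict.empty, 0)
  (s1.1, s3.1, s1.2.1.items, s3.2.1.items)

-- ===== PORT B =====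
-- the shared per-token classifier of Source B
def pvEmit (st : List String × PySem.Dict String Int × Int) (tok : String) :
    List String × PySem.Dict String Int × Int :=
  if PySem.Str.isIn ":" tok then
    (st.1, st.2.1.insert (PySem.Str.slice tok (some 0) (some (PySem.Str.find tok ":"))) st.2.2, st.2.2)
  else
    (st.1 ++ [tok], st.2.1, st.2.2 + 1)

def pvScan (lines : List String) (expand : String → List String) :
    List String × PySem.Dict String Int :=
  let st := (PySem.List.slice lines (some 1) none).foldl
    (fun st line => (expand line).foldl pvEmit st) ([], PySem.Dict.empty, 0)
  (st.1, st.2.1)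

def pvExpandData (line : String) : List String :=
  if PySem.Str.isIn ":" line || PySem.Str.strIsdigit line then [line]
  else ((line.toList.drop 1).dropLast).map (fun c => String.ofList ['\'', c, '\'']) ++ ["\x00"]

def work_with_labels_alt (instr : List String) (data : List String) :
    List String × List String × (List (String × Int)) × (List (String × Int)) :=
  let i := pvScan instr (fun line => [line])
  let d := pvScan data pvExpandData
  (i.1, d.1, i.2.items, d.2.items)

-- ===== PRECONDITION & SPEC =====
def Spec_work_with_labels (instr : List String) (data : List String) (out : List String × List String × (List (String × Int)) × (List (String × Int))) : Prop := out = work_with_labels_alt instr data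
instance (instr : List String) (data : List String) (out : List String × List String × (List (String × Int)) × (List (String × Int))) : Decidable (Spec_work_with_labels instr data out) := by unfold Spec_work_with_labels; infer_instance

-- ===== CLAIM (what is proved, stated in full; the proofs are below) =====
def Claim_equal_work_with_labels : Prop := ∀ (instr : List String) (data : List String), Dom_work_with_labels instr data → Spec_work_with_labels instr data (work_with_labels instr data)

-- ===== LEMMAS AND PROOFS =====

-- A's second loop builds exactly the flatMap of B's expansion
theorem tmp_eq_flatMap (xs : List String) (acc : List String) :
    xs.foldl
      (fun acc line =>
        if PySem.Str.isIn ":" line then acc ++ [line]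
        else if PySem.Str.strIsdigit line then acc ++ [line]
        else
          (((line.toList.drop 1).dropLast).foldl
            (fun a c => a ++ [String.ofList ['\'', c, '\'']]) acc) ++ ["\x00"])
      acc = acc ++ xs.flatMap pvExpandData := by
  induction xs generalizing acc with
  | nil => simp
  | cons x xs ih =>
    rw [List.foldl_cons, ih, List.flatMap_cons, ← List.append_assoc]
    congr 1
    rw [PySem.List.foldl_append_singleton_eq_map]
    unfold pvExpandData
    by_cases h1 : PySem.Chars.isIn [':'] x.toList
    · simp [h1]
    · by_cases h2 : PySem.Chars.strIsdigit x.toList <;> simp [h1, h2]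

-- ===== VERDICT (by name: the statement is the Claim_ definition above) =====
theorem work_with_labels_spec : Claim_equal_work_with_labels := by
  intro instr data _
  show work_with_labels instr data = work_with_labels_alt instr data
  simp only [work_with_labels, work_with_labels_alt, pvScan, tmp_eq_flatMap,
    List.nil_append, List.foldl_flatMap]
  rfl
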